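-- pv_equiv track=rewrite | github.com/AugustiMaxima/py-ttt-ai | learningttt.py | stateindex
-- ===== SOURCE A (Python) =====
-- def stateindex(state):#the other alternative would be a dictionary, which would be grossly inefficient
--     index=0
--     for i in range(len(state)):
--         q=0
--         if state[i]=="X":
--             q=1
--         elif state[i]=="O":
--             q=2
--         index+=q*3**i
--     return index
-- ===== SOURCE B (Python) =====
-- def stateindex(state):
--     if not state:
--         return 0
--     if len(state) == 1:
--         return 1 if state[0] == "X" else 2 if state[0] == "O" else 0
--     mid = len(state) // 2
--     return stateindex(state[:mid]) + 3 ** mid * stateindex(state[mid:])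
-- ===== Notes on version B (the rewrite author's own statement) =====
-- stated objective: faster
-- what changed: Replaces A's single forward loop summing q*3**i with a fresh full-size power at every position by a divide-and-conquer recursion: split the list in half, encode each half recursively, combine as low + 3**mid * high.
import Mathlib
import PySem

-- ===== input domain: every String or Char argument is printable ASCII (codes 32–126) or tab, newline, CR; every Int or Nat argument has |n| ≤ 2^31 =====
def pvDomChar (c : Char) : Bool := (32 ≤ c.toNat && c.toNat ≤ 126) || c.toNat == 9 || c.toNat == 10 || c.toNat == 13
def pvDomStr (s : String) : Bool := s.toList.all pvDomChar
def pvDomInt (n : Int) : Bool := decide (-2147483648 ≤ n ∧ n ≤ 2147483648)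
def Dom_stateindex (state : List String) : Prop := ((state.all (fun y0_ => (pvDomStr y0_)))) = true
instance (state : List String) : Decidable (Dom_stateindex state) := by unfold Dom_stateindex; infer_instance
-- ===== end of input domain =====

-- B re-implements the base-3 encoding by divide-and-conquer: split the list in half, encode each
-- half recursively, combine as low + 3^mid * high; same value as A's single weighted-sum loop.

-- ===== PORT A =====
def stateindex (state : List String) : Int :=
  (PySem.List.pyRange 0 (state.length : Int) 1).foldl
    (fun index i =>
      let q : Int :=
        if PySem.List.pyGetD state i "" = "X" then 1
        else if PySem.List.pyGetD state i "" = "O" then 2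
        else 0
      index + q * 3 ^ i.toNat) 0

-- ===== PORT B =====
def stateindex_alt (state : List String) : Int :=
  if state = [] then 0
  else if state.length = 1 then
    (if PySem.List.pyGetD state 0 "" = "X" then 1
     else if PySem.List.pyGetD state 0 "" = "O" then 2 else 0)
  else
    let mid := state.length / 2    -- len(state)//2 on a nonnegative value: Nat division is exact here
    stateindex_alt (PySem.List.slice state none (some (mid : Int)))
      + 3 ^ mid * stateindex_alt (PySem.List.slice state (some (mid : Int)) none)
termination_by state.length
decreasing_by
  · have h0 : state.length ≠ 0 := by simpa using List.length_eq_zero_iff.not.mpr ‹state ≠ []›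
    rw [PySem.List.slice_to_natCast]
    simp [List.length_take]
    omega
  · have h0 : state.length ≠ 0 := by simpa using List.length_eq_zero_iff.not.mpr ‹state ≠ []›
    rw [PySem.List.slice_from_natCast]
    simp [List.length_drop]
    omega

-- ===== PRECONDITION & SPEC =====
def Spec_stateindex (state : List String) (out : Int) : Prop := out = stateindex_alt state
instance (state : List String) (out : Int) : Decidable (Spec_stateindex state out) := by unfold Spec_stateindex; infer_instance

-- ===== CLAIM =====
def Claim_equal_stateindex : Prop := ∀ (state : List String), Dom_stateindex state → Spec_stateindex state (stateindex state)

-- ===== LEMMAS AND PROOFS =====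

/-- Base-3 digit of a cell. -/
def pvQ (s : String) : Int := if s = "X" then 1 else if s = "O" then 2 else 0

/-- Reference value: least-significant digit first. -/
def pvVal : List String → Int
  | [] => 0
  | x :: t => pvQ x + 3 * pvVal t

theorem pvVal_append (a b : List String) :
    pvVal (a ++ b) = pvVal a + 3 ^ a.length * pvVal b := by
  induction a with
  | nil => simp [pvVal]
  | cons y t ih => simp [pvVal, ih, pow_succ]; ring

theorem pvVal_append_singleton (l : List String) (x : String) :
    pvVal (l ++ [x]) = pvVal l + pvQ x * 3 ^ l.length := by
  rw [pvVal_append]; simp [pvVal]; ring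

theorem pvB_single (l : List String) (h1 : l.length = 1) :
    (if PySem.List.pyGetD l 0 "" = "X" then (1:Int)
     else if PySem.List.pyGetD l 0 "" = "O" then 2 else 0) = pvVal l := by
  obtain ⟨x, hx⟩ : ∃ x, l = [x] := List.length_eq_one_iff.1 h1
  subst hx
  simp [pvVal, pvQ, PySem.List.pyGetD, PySem.List.pyGet?, PySem.List.pyIdx?]

theorem pvB_eq (l : List String) : stateindex_alt l = pvVal l := by
  induction l using stateindex_alt.induct with
  | case1 => simp [stateindex_alt, pvVal]
  | case2 l hne h1 hX =>
      rw [stateindex_alt, if_neg hne, if_pos h1, pvB_single l h1]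
  | case3 l hne h1 hnX hO =>
      rw [stateindex_alt, if_neg hne, if_pos h1, pvB_single l h1]
  | case4 l hne h1 hnX hnO =>
      rw [stateindex_alt, if_neg hne, if_pos h1, pvB_single l h1]
  | case5 l hne h1 mid ihlo ihhi =>
      rw [stateindex_alt, if_neg hne, if_neg h1]
      have e : (mid : ℕ) = l.length / 2 := rfl
      rw [← e]
      show stateindex_alt (PySem.List.slice l none (some (mid:Int)))
            + 3 ^ mid * stateindex_alt (PySem.List.slice l (some (mid:Int)) none) = pvVal l
      rw [ihlo, ihhi, PySem.List.slice_to_natCast, PySem.List.slice_from_natCast]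
      conv_rhs => rw [← List.take_append_drop mid l]
      rw [pvVal_append]
      have hlen : (l.take mid).length = mid := by
        have h0 : l.length ≠ 0 := by simpa using List.length_eq_zero_iff.not.mpr hne
        simp [List.length_take, e]
        omega
      rw [hlen]

theorem pvA_gen (l : List String) (acc : Int) :
    (PySem.List.pyRange 0 (l.length : Int) 1).foldl
      (fun index i =>
        let q : Int :=
          if PySem.List.pyGetD l i "" = "X" then 1
          else if PySem.List.pyGetD l i "" = "O" then 2
          else 0
        index + q * 3 ^ i.toNat) acc
      = acc + pvVal l := by
  induction l using List.reverseRecOn generalizing acc with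
  | nil => simp [PySem.List.pyRange_one_eq_nil]; simp [pvVal]
  | append_singleton t x ih =>
      have hlen : ((t ++ [x]).length : Int) = (t.length : Int) + 1 := by
        simp
      rw [hlen, PySem.List.pyRange_one_succ_right (Int.natCast_nonneg _), List.foldl_append]
      have hcongr :
          (PySem.List.pyRange 0 (t.length : Int) 1).foldl
            (fun index i =>
              let q : Int :=
                if PySem.List.pyGetD (t ++ [x]) i "" = "X" then 1
                else if PySem.List.pyGetD (t ++ [x]) i "" = "O" then 2
                else 0
              index + q * 3 ^ i.toNat) acc
          = (PySem.List.pyRange 0 (t.length : Int) 1).foldl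
            (fun index i =>
              let q : Int :=
                if PySem.List.pyGetD t i "" = "X" then 1
                else if PySem.List.pyGetD t i "" = "O" then 2
                else 0
              index + q * 3 ^ i.toNat) acc := by
        apply PySem.List.foldl_congr_mem
        intro b i hi
        have hmem := (PySem.List.mem_pyRange_one).1 hi
        have h0 : 0 ≤ i := hmem.1
        have h1 : i < (t.length : Int) := hmem.2
        have hg : PySem.List.pyGetD (t ++ [x]) i "" = PySem.List.pyGetD t i "" := by
          rw [PySem.List.pyGetD_eq_getElem _ _ h0 (by simp; omega),
              PySem.List.pyGetD_eq_getElem _ _ h0 (by simpa using h1)]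
          rw [List.getElem_append_left (by omega)]
        simp [hg]
      rw [hcongr, ih]
      have hx : PySem.List.pyGetD (t ++ [x]) (t.length : Int) "" = x := by
        rw [PySem.List.pyGetD_eq_getElem _ _ (Int.natCast_nonneg _) (by simp)]
        simp
      simp only [List.foldl_cons, List.foldl_nil, hx, pvVal_append_singleton]
      simp [pvQ]
      ring

-- ===== VERDICT =====
theorem stateindex_spec : Claim_equal_stateindex := by
  intro state _
  show stateindex state = stateindex_alt state
  rw [stateindex, pvA_gen, pvB_eq]
  simp
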